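-- pv_equiv track=rewrite | github.com/ssiddhantsood/Constraint-Programming-TJHSST-AI | AI/tjServer.py | flip_tokens
-- ===== SOURCE A (Python) =====
-- def flip_tokens(bo, row, col, drow, dcol, token):
--   toFlip = []
--   johnathan = False
--   trow = row; tcol = col
--   if token == 'o': othertok = 'x'
--   else: othertok = 'o'
--   while True:
--     trow = trow + drow;tcol = tcol + dcol
--     if trow<0 or trow>=8 or tcol<0 or tcol>=8:  break
--     if bo[trow][tcol] == token: johnathan = True
--     elif bo[trow][tcol] != othertok: break
--
--   while johnathan:
--     row = row + drow; col = col + dcol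
--     if row<0 or row>=8 or col<0 or col>=8:  break
--     if bo[row][col] == token or bo[row][col] =='.':  break
--     toFlip.append((row, col))
--   for row, col in toFlip: bo[row][col] = token
--   return bo
-- ===== SOURCE B (Python) =====
-- def flip_tokens(bo, row, col, drow, dcol, token):
--     othertok = 'x' if token == 'o' else 'o'
--     candidates = []
--     found = False
--     r, c = row + drow, col + dcol
--     while 0 <= r < 8 and 0 <= c < 8:
--         cell = bo[r][c]
--         if cell == othertok:
--             candidates.append((r, c))
--             r += drow
--             c += dcol
--         elif cell == token:
--             found = True
--             break
--         else:
--             break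
--     if found:
--         for r, c in candidates:
--             bo[r][c] = token
--     return bo
-- ===== Notes on version B (the rewrite author's own statement) =====
-- stated objective: simpler
-- what changed: A's two separate ray scans (one loop to decide whether an own token closes the ray, a second loop to re-walk the ray and collect the cells to flip) are replaced by a single walk that collects candidate cells and flips them only if the own token was reached.
-- outside the precondition, e.g. on flip_tokens([['.', '.', '.']], 0, 0, 0, 1, 'o'): A returns [['.', '.', '.']], B returns [['.', '.', '.']]; on flip_tokens([['.']], 0, 0, 0, 0, 'o'): A returns [['.']], B returns [['.']]
import Mathlib
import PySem

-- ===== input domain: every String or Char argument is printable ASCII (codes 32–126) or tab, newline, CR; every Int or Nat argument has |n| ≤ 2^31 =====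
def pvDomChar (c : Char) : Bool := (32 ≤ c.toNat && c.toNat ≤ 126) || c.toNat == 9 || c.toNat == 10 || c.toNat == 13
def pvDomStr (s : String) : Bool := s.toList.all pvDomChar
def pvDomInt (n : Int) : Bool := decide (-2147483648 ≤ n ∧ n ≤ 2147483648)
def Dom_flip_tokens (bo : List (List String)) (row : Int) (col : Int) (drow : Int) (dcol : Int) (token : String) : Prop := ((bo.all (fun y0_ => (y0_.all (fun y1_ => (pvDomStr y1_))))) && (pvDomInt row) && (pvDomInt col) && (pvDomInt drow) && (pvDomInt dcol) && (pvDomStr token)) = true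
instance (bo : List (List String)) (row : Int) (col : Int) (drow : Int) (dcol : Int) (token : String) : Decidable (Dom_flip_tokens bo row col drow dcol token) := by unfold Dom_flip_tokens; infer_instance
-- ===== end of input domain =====

-- B replaces A's two separate ray scans (one to decide, one to collect) by a single pass that
-- collects candidates and flips them only if the own token closed the ray (objective: simpler).
-- Both Pythons mutate bo in place the same way; the equivalence proved here is about the return value.

-- ===== PORT A =====
-- shared helper: bo[r][c]; both programs only read it with 0 ≤ r,c < 8, in range on Pre_ boards
def pvCellAt (bo : List (List String)) (r c : Int) : String :=
  ((PySem.List.pyGet? bo r).bind (fun rw => PySem.List.pyGet? rw c)).getD ""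

-- shared helper: bo[r][c] = tok; both programs only write with 0 ≤ r,c, so toNat is exact
def pvSetCell (bo : List (List String)) (r c : Int) (tok : String) : List (List String) :=
  bo.set r.toNat ((bo.getD r.toNat []).set c.toNat tok)

-- A's first while-loop (fuel-bounded; with (drow,dcol) ≠ (0,0) the loop breaks within 10 steps,
-- since a coordinate with nonzero step takes ≤ 8 distinct in-bounds values, so fuel 16 is never exhausted on Pre_)
def pvScan1 (bo : List (List String)) (drow dcol : Int) (token othertok : String) :
    Int → Int → Bool → Nat → Bool
  | _, _, john, 0 => john
  | trow, tcol, john, Nat.succ fuel =>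
    let trow' := trow + drow
    let tcol' := tcol + dcol
    if trow' < 0 ∨ 8 ≤ trow' ∨ tcol' < 0 ∨ 8 ≤ tcol' then john
    else if pvCellAt bo trow' tcol' = token then pvScan1 bo drow dcol token othertok trow' tcol' true fuel
    else if pvCellAt bo trow' tcol' ≠ othertok then john
    else pvScan1 bo drow dcol token othertok trow' tcol' john fuel

-- A's second while-loop ('while johnathan': johnathan is constant inside, so the caller guards it)
def pvScan2 (bo : List (List String)) (drow dcol : Int) (token : String) :
    Int → Int → Nat → List (Int × Int)
  | _, _, 0 => []
  | row, col, Nat.succ fuel =>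
    let row' := row + drow
    let col' := col + dcol
    if row' < 0 ∨ 8 ≤ row' ∨ col' < 0 ∨ 8 ≤ col' then []
    else if pvCellAt bo row' col' = token ∨ pvCellAt bo row' col' = "." then []
    else (row', col') :: pvScan2 bo drow dcol token row' col' fuel

def flip_tokens (bo : List (List String)) (row : Int) (col : Int) (drow : Int) (dcol : Int) (token : String) : List (List String) :=
  let othertok := if token = "o" then "x" else "o"
  let john := pvScan1 bo drow dcol token othertok row col false 16
  let toFlip := if john then pvScan2 bo drow dcol token row col 16 else []
  toFlip.foldl (fun b rc => pvSetCell b rc.1 rc.2 token) bo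

-- ===== PORT B =====
-- B's single while-loop: walk the ray once, collecting candidates, reporting whether token closed it
def pvScanB (bo : List (List String)) (drow dcol : Int) (token othertok : String) :
    Int → Int → List (Int × Int) → Nat → List (Int × Int) × Bool
  | _, _, acc, 0 => (acc, false)
  | r, c, acc, Nat.succ fuel =>
    if r < 0 ∨ 8 ≤ r ∨ c < 0 ∨ 8 ≤ c then (acc, false)
    -- Python binds cell = bo[r][c] once; the pure read is repeated here
    else if pvCellAt bo r c = othertok then pvScanB bo drow dcol token othertok (r + drow) (c + dcol) (acc ++ [(r, c)]) fuel
    else if pvCellAt bo r c = token then (acc, true)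
    else (acc, false)

def flip_tokens_alt (bo : List (List String)) (row : Int) (col : Int) (drow : Int) (dcol : Int) (token : String) : List (List String) :=
  let othertok := if token = "o" then "x" else "o"
  let res := pvScanB bo drow dcol token othertok (row + drow) (col + dcol) [] 16
  if res.2 then res.1.foldl (fun b rc => pvSetCell b rc.1 rc.2 token) bo else bo

-- ===== PRECONDITION & SPEC =====
-- Pre_ excludes drow = dcol = 0 (A's first loop never advances and diverges whenever the start
-- cell holds token or othertok) and boards in which one of the first eight ray positions lying
-- inside the 8x8 window has no cell in bo (A indexes bo[r][c] there, an IndexError, unless an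
-- earlier cell breaks the scan first; on such early-break inputs A still returns, and B returns
-- the same value — see cites).
def Pre_flip_tokens (bo : List (List String)) (row : Int) (col : Int) (drow : Int) (dcol : Int) (token : String) : Prop :=
  ¬(drow = 0 ∧ dcol = 0) ∧
  ∀ k : Nat, 1 ≤ k → k ≤ 8 →
    (0 ≤ row + k * drow ∧ row + k * drow < 8 ∧ 0 ≤ col + k * dcol ∧ col + k * dcol < 8) →
    ((row + k * drow).toNat < bo.length ∧
      (col + k * dcol).toNat < (bo.getD (row + k * drow).toNat []).length)
instance (bo : List (List String)) (row : Int) (col : Int) (drow : Int) (dcol : Int) (token : String) : Decidable (Pre_flip_tokens bo row col drow dcol token) := by unfold Pre_flip_tokens; infer_instance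

def pvWitness_flip_tokens : List (List String) × Int × Int × Int × Int × String :=
  ([[".", ".", ".", ".", ".", ".", ".", "."],
    [".", ".", ".", ".", ".", ".", ".", "."],
    [".", ".", ".", ".", ".", ".", ".", "."],
    [".", ".", ".", "o", "x", ".", ".", "."],
    [".", ".", ".", "x", "o", ".", ".", "."],
    [".", ".", ".", ".", ".", ".", ".", "."],
    [".", ".", ".", ".", ".", ".", ".", "."],
    [".", ".", ".", ".", ".", ".", ".", "."]], 3, 2, 0, 1, "o")

def Spec_flip_tokens (bo : List (List String)) (row : Int) (col : Int) (drow : Int) (dcol : Int) (token : String) (out : List (List String)) : Prop := out = flip_tokens_alt bo row col drow dcol token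
instance (bo : List (List String)) (row : Int) (col : Int) (drow : Int) (dcol : Int) (token : String) (out : List (List String)) : Decidable (Spec_flip_tokens bo row col drow dcol token out) := by unfold Spec_flip_tokens; infer_instance

-- ===== CLAIM (what is proved, stated in full; the proofs are below) =====
def Claim_equal_flip_tokens : Prop := ∀ (bo : List (List String)) (row : Int) (col : Int) (drow : Int) (dcol : Int) (token : String), Dom_flip_tokens bo row col drow dcol token → Pre_flip_tokens bo row col drow dcol token → Spec_flip_tokens bo row col drow dcol token (flip_tokens bo row col drow dcol token)

-- ===== LEMMAS AND PROOFS =====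

theorem pvOther_ne (token : String) : (if token = "o" then "x" else "o") ≠ token := by
  split
  · next h => subst h; decide
  · next h => exact fun h' => h h'.symm

theorem pvScan1_true (bo : List (List String)) (drow dcol : Int) (token othertok : String) :
    ∀ (fuel : Nat) (trow tcol : Int), pvScan1 bo drow dcol token othertok trow tcol true fuel = true := by
  intro fuel
  induction fuel with
  | zero => intro _ _; rfl
  | succ n ih =>
    intro trow tcol
    simp only [pvScan1]
    split_ifs <;> first | rfl | exact ih _ _

theorem pvScanB_acc (bo : List (List String)) (drow dcol : Int) (token othertok : String) :
    ∀ (fuel : Nat) (r c : Int) (acc : List (Int × Int)),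
      pvScanB bo drow dcol token othertok r c acc fuel =
        (acc ++ (pvScanB bo drow dcol token othertok r c [] fuel).1,
         (pvScanB bo drow dcol token othertok r c [] fuel).2) := by
  intro fuel
  induction fuel with
  | zero => intro r c acc; simp [pvScanB]
  | succ n ih =>
    intro r c acc
    by_cases hob : r < 0 ∨ 8 ≤ r ∨ c < 0 ∨ 8 ≤ c
    · simp [pvScanB, hob]
    · by_cases hoth : pvCellAt bo r c = othertok
      · simp only [pvScanB, if_neg hob, if_pos hoth]
        rw [ih (r + drow) (c + dcol) (acc ++ [(r, c)]), ih (r + drow) (c + dcol) ([] ++ [(r, c)])]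
        simp
      · simp only [pvScanB, if_neg hob, if_neg hoth]
        split <;> simp

-- the single pass of B computes A's two scans: the found flag is A's johnathan (from john = false),
-- and when the flag holds the candidates are A's toFlip
theorem pvScanB_eq (bo : List (List String)) (drow dcol : Int) (token othertok : String)
    (hne : othertok ≠ token) (hnd : othertok ≠ ".") :
    ∀ (fuel : Nat) (r c : Int),
      (pvScanB bo drow dcol token othertok (r + drow) (c + dcol) [] fuel).2 =
        pvScan1 bo drow dcol token othertok r c false fuel ∧
      ((pvScanB bo drow dcol token othertok (r + drow) (c + dcol) [] fuel).2 = true →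
        (pvScanB bo drow dcol token othertok (r + drow) (c + dcol) [] fuel).1 =
          pvScan2 bo drow dcol token r c fuel) := by
  intro fuel
  induction fuel with
  | zero => intro r c; exact ⟨rfl, by intro h; exact absurd h (by simp [pvScanB])⟩
  | succ n ih =>
    intro r c
    by_cases hob : r + drow < 0 ∨ 8 ≤ r + drow ∨ c + dcol < 0 ∨ 8 ≤ c + dcol
    · simp [pvScanB, pvScan1, pvScan2, hob]
    · by_cases hoth : pvCellAt bo (r + drow) (c + dcol) = othertok
      · -- cell = othertok (hence ≠ token): all three loops continue
        have hcne : ¬ pvCellAt bo (r + drow) (c + dcol) = token := by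
          rw [hoth]; exact hne
        have hnp : ¬ (pvCellAt bo (r + drow) (c + dcol) = token ∨ pvCellAt bo (r + drow) (c + dcol) = ".") := by
          rw [hoth]; exact not_or.mpr ⟨hne, hnd⟩
        obtain ⟨ih1, ih2⟩ := ih (r + drow) (c + dcol)
        simp only [pvScanB, pvScan1, pvScan2, if_neg hob, if_pos hoth, if_neg hcne,
          if_neg (by simp [hoth] : ¬ pvCellAt bo (r + drow) (c + dcol) ≠ othertok), if_neg hnp]
        rw [pvScanB_acc bo drow dcol token othertok n (r + drow + drow) (c + dcol + dcol) ([] ++ [(r + drow, c + dcol)])]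
        constructor
        · simpa using ih1
        · intro hfound
          have := ih2 (by simpa using hfound)
          simp [this]
      · by_cases htok : pvCellAt bo (r + drow) (c + dcol) = token
        · -- cell = token: A's flag loop continues with true, B and the flip loop stop here
          simp only [pvScanB, pvScan1, pvScan2, if_neg hob, if_neg hoth, if_pos htok,
            if_pos (Or.inl htok : pvCellAt bo (r + drow) (c + dcol) = token ∨ pvCellAt bo (r + drow) (c + dcol) = ".")]
          exact ⟨(pvScan1_true bo drow dcol token othertok n _ _).symm, by simp⟩
        · -- any other cell ('.' included): everything stops, flag false
          simp [pvScanB, pvScan1, pvScan2, hob, hoth, htok]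

-- ===== VERDICT (by name: the statement is the Claim_ definition above) =====
theorem flip_tokens_spec : Claim_equal_flip_tokens := by
  intro bo row col drow dcol token _ _
  unfold Spec_flip_tokens flip_tokens flip_tokens_alt
  obtain ⟨h1, h2⟩ := pvScanB_eq bo drow dcol token (if token = "o" then "x" else "o")
    (pvOther_ne token) (by split <;> decide) 16 row col
  by_cases hf : (pvScanB bo drow dcol token (if token = "o" then "x" else "o")
      (row + drow) (col + dcol) [] 16).2 = true
  · simp only [hf, if_true, ← h1, h2 hf]
  · have : pvScan1 bo drow dcol token (if token = "o" then "x" else "o") row col false 16 = false := by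
      rw [← h1]; exact Bool.eq_false_iff.mpr hf
    simp [this, hf]
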